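-- pv_equiv track=rewrite | github.com/Marawan-Ahmed/AlexU-Level-3-DataStructures-Labs | assignment3/Hockey.py | countConnectedComponents
-- ===== SOURCE A (Python) =====
-- def countConnectedComponents(numbered_img, img_row, img_column,connectedComp,threshold):
--     possiblePlayers = [[0]*5 for i in range(connectedComp)]  #each element consists of number ofelements min x,,max x,min y max y
--     for row in range (img_row):
--         for col in range (img_column):
--             if (numbered_img[row][col] != 0):
--                 if (possiblePlayers[numbered_img[row][col]-1][0] == 0):
--                     possiblePlayers[numbered_img[row][col]-1][1] = col
--                     possiblePlayers[numbered_img[row][col]-1][2] = col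
--                     possiblePlayers[numbered_img[row][col]-1][3] = row
--                     possiblePlayers[numbered_img[row][col]-1][4] = row
--                 else:
--                     if (possiblePlayers[numbered_img[row][col]-1][1] > col ):
--                         possiblePlayers[numbered_img[row][col]-1][1] = col
--                     if (possiblePlayers[numbered_img[row][col]-1][2] < col ):
--                         possiblePlayers[numbered_img[row][col]-1][2] = col
--
--                     if (possiblePlayers[numbered_img[row][col]-1][3] > row ):
--                         possiblePlayers[numbered_img[row][col]-1][3] = row
--                     if (possiblePlayers[numbered_img[row][col]-1][4] < row ):
--                         possiblePlayers[numbered_img[row][col]-1][4] = row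
--
--                 possiblePlayers[numbered_img[row][col]-1][0] += 1
--
--     playersPosition = []
--
--     for i in range(connectedComp):
--         if ((possiblePlayers[i][0]*4) >= threshold):
--             playersPosition.append((possiblePlayers[i][1] + 1 + possiblePlayers[i][2],possiblePlayers[i][3] + 1 + possiblePlayers[i][4]))
--     return playersPosition
-- ===== SOURCE B (Python) =====
-- def countConnectedComponents(numbered_img, img_row, img_column, connectedComp, threshold):
--     # Group the coordinates of every labeled pixel by label, then read each
--     # bounding-box center off its group with min/max.
--     coords = [[] for _ in range(connectedComp)]
--     for row in range(img_row):
--         for col in range(img_column):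
--             v = numbered_img[row][col]
--             if v != 0:
--                 coords[v - 1].append((row, col))
--     centers = []
--     for group in coords:
--         if group and len(group) * 4 >= threshold:
--             rows = [r for r, _ in group]
--             cols = [c for _, c in group]
--             centers.append((min(cols) + 1 + max(cols), min(rows) + 1 + max(rows)))
--     return centers
-- ===== Notes on version B (the rewrite author's own statement) =====
-- stated objective: simpler
-- what changed: B replaces A's per-label table of five hand-maintained accumulator fields (count plus min/max x/y with a first-pixel sentinel branch) by per-label coordinate lists filled in one scan, reading each bounding-box center off with min/max at the end.
-- intended difference: When threshold <= 0 and some label slot in 1..connectedComp has no pixel in the scanned region, A emits a bogus center (1,1) for that pixel-less component (its zero-initialized accumulators pass the threshold), while B reports centers only for components that actually contain pixels, which is the intended meaning of a bounding-box center. — e.g. on countConnectedComponents([[1, 0], [0, 0]], 2, 2, 2, 0): A returns [(1, 1), (1, 1)], B returns [(1, 1)]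
import Mathlib
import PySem

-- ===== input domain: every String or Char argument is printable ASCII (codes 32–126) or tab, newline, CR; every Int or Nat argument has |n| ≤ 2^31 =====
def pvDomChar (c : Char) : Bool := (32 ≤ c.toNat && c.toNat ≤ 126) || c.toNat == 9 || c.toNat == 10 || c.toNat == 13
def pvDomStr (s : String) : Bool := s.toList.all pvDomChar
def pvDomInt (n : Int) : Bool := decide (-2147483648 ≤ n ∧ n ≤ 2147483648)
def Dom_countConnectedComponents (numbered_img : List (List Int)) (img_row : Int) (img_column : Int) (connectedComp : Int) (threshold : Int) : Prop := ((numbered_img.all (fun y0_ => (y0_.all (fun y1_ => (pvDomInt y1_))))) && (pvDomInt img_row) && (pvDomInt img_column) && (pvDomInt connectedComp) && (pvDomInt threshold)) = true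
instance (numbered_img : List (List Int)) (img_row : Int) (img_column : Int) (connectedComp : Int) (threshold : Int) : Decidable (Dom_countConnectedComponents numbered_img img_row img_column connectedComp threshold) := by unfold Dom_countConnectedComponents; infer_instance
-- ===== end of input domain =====

-- B replaces A's table of five hand-maintained accumulator fields per label by per-label
-- coordinate lists whose bounding box is read off with min/max at the end (simpler: no
-- first-pixel sentinel logic and no branch-per-field updates); on threshold ≤ 0 with a
-- pixel-less label slot the two differ as stated at D_ below.

-- ===== PORT A =====
-- the in-place update of the 5-field stats record possiblePlayers[v-1] (count, minx, maxx, miny, maxy)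
def pvStepA (st : List Int) (row col : Int) : List Int :=
  let st1 :=
    if PySem.List.pyGetD st 0 0 == 0 then
      PySem.List.pySetD (PySem.List.pySetD (PySem.List.pySetD (PySem.List.pySetD st 1 col) 2 col) 3 row) 4 row
    else
      let a := if PySem.List.pyGetD st 1 0 > col then PySem.List.pySetD st 1 col else st
      let b := if PySem.List.pyGetD a 2 0 < col then PySem.List.pySetD a 2 col else a
      let c := if PySem.List.pyGetD b 3 0 > row then PySem.List.pySetD b 3 row else b
      if PySem.List.pyGetD c 4 0 < row then PySem.List.pySetD c 4 row else c
  PySem.List.pySetD st1 0 (PySem.List.pyGetD st1 0 0 + 1)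

def countConnectedComponents (numbered_img : List (List Int)) (img_row : Int) (img_column : Int) (connectedComp : Int) (threshold : Int) : List (Int × Int) :=
  let possiblePlayers : List (List Int) :=
    (PySem.List.pyRange 0 connectedComp).map (fun _ => ([0, 0, 0, 0, 0] : List Int))
  let possiblePlayers :=
    (PySem.List.pyRange 0 img_row).foldl (fun pp row =>
      (PySem.List.pyRange 0 img_column).foldl (fun pp col =>
        let v := PySem.List.pyGetD (PySem.List.pyGetD numbered_img row []) col 0
        if v ≠ 0 then
          PySem.List.pySetD pp (v - 1) (pvStepA (PySem.List.pyGetD pp (v - 1) []) row col)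
        else pp) pp) possiblePlayers
  (PySem.List.pyRange 0 connectedComp).foldl (fun playersPosition i =>
    let st := PySem.List.pyGetD possiblePlayers i []
    if PySem.List.pyGetD st 0 0 * 4 ≥ threshold then
      playersPosition ++ [(PySem.List.pyGetD st 1 0 + 1 + PySem.List.pyGetD st 2 0,
                           PySem.List.pyGetD st 3 0 + 1 + PySem.List.pyGetD st 4 0)]
    else playersPosition) []

-- ===== PORT B =====
def countConnectedComponents_alt (numbered_img : List (List Int)) (img_row : Int) (img_column : Int) (connectedComp : Int) (threshold : Int) : List (Int × Int) :=
  let coords : List (List (Int × Int)) :=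
    (PySem.List.pyRange 0 connectedComp).map (fun _ => ([] : List (Int × Int)))
  let coords :=
    (PySem.List.pyRange 0 img_row).foldl (fun cs row =>
      (PySem.List.pyRange 0 img_column).foldl (fun cs col =>
        let v := PySem.List.pyGetD (PySem.List.pyGetD numbered_img row []) col 0
        if v ≠ 0 then
          PySem.List.pySetD cs (v - 1) (PySem.List.pyGetD cs (v - 1) [] ++ [(row, col)])
        else cs) cs) coords
  coords.foldl (fun centers group =>
    if group ≠ [] ∧ PySem.List.len group * 4 ≥ threshold then
      let rows := group.map Prod.fst
      let cols := group.map Prod.snd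
      centers ++ [((PySem.List.min? cols (fun y => y)).getD 0 + 1 + (PySem.List.max? cols (fun y => y)).getD 0,
                   (PySem.List.min? rows (fun y => y)).getD 0 + 1 + (PySem.List.max? rows (fun y => y)).getD 0)]
    else centers) []

-- ===== PRECONDITION & SPEC =====
-- Pre_: exactly the inputs on which the Python A returns normally: whenever the scan body runs
-- (img_row, img_column > 0), every scanned row index is in range, every scanned row is long
-- enough (no IndexError on numbered_img), and every nonzero scanned label v indexes
-- possiblePlayers within Python's (possibly negative) index range (no IndexError on
-- possiblePlayers[v-1]).
def Pre_countConnectedComponents (numbered_img : List (List Int)) (img_row : Int) (img_column : Int) (connectedComp : Int) (threshold : Int) : Prop :=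
  (0 < img_row ∧ 0 < img_column → img_row ≤ (numbered_img.length : Int)) ∧
  (0 < img_column →
    ∀ r ∈ numbered_img.take img_row.toNat,
      img_column ≤ (r.length : Int) ∧
      ∀ v ∈ r.take img_column.toNat, v ≠ 0 →
        -((connectedComp.toNat : Int)) ≤ v - 1 ∧ v - 1 < (connectedComp.toNat : Int))

instance (numbered_img : List (List Int)) (img_row : Int) (img_column : Int) (connectedComp : Int) (threshold : Int) : Decidable (Pre_countConnectedComponents numbered_img img_row img_column connectedComp threshold) := by
  unfold Pre_countConnectedComponents; infer_instance

def pvWitness_countConnectedComponents : List (List Int) × Int × Int × Int × Int :=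
  ([[1, 0], [0, 2]], 2, 2, 2, 1)

-- the label slot (1-based) a pixel value addresses, if any: v itself, or its
-- negative-index alias v + connectedComp
def pvSlot (connectedComp v : Int) : Option Int :=
  if 1 ≤ v ∧ v ≤ connectedComp then some v
  else if 1 - connectedComp ≤ v ∧ v ≤ -1 then some (v + connectedComp)
  else none

-- the slots addressed by the pixels the scan visits
def pvSlots (numbered_img : List (List Int)) (img_row img_column connectedComp : Int) : List Int :=
  ((numbered_img.take img_row.toNat).flatMap (fun r => r.take img_column.toNat)).filterMap
    (pvSlot connectedComp)

-- When threshold ≤ 0 and some label slot in 1..connectedComp is addressed by no pixel in the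
-- scanned region (fewer distinct addressed slots than connectedComp), A emits a bogus center
-- (1,1) for each pixel-less component — its zero-initialized accumulators pass the threshold —
-- while B reports centers only for components that actually contain pixels, which is the
-- intended meaning of a bounding-box center.
def D_countConnectedComponents (numbered_img : List (List Int)) (img_row : Int) (img_column : Int) (connectedComp : Int) (threshold : Int) : Prop :=
  threshold ≤ 0 ∧ 0 < connectedComp ∧
  (((pvSlots numbered_img img_row img_column connectedComp).dedup.length : Int) < connectedComp)

instance (numbered_img : List (List Int)) (img_row : Int) (img_column : Int) (connectedComp : Int) (threshold : Int) : Decidable (D_countConnectedComponents numbered_img img_row img_column connectedComp threshold) := by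
  unfold D_countConnectedComponents; infer_instance

def Spec_countConnectedComponents (numbered_img : List (List Int)) (img_row : Int) (img_column : Int) (connectedComp : Int) (threshold : Int) (out : List (Int × Int)) : Prop := ¬ D_countConnectedComponents numbered_img img_row img_column connectedComp threshold → out = countConnectedComponents_alt numbered_img img_row img_column connectedComp threshold
instance (numbered_img : List (List Int)) (img_row : Int) (img_column : Int) (connectedComp : Int) (threshold : Int) (out : List (Int × Int)) : Decidable (Spec_countConnectedComponents numbered_img img_row img_column connectedComp threshold out) := by unfold Spec_countConnectedComponents; infer_instance

def pvDiffWitness_countConnectedComponents : List (List Int) × Int × Int × Int × Int :=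
  ([[1, 0], [0, 0]], 2, 2, 2, 0)

def pvDiffWitnessOut_countConnectedComponents : (List (Int × Int)) × (List (Int × Int)) :=
  ([(1, 1), (1, 1)], [(1, 1)])

-- ===== CLAIM (what is proved, stated in full; the proofs are below) =====
def Claim_unchanged_countConnectedComponents : Prop := ∀ (numbered_img : List (List Int)) (img_row : Int) (img_column : Int) (connectedComp : Int) (threshold : Int), Dom_countConnectedComponents numbered_img img_row img_column connectedComp threshold → Pre_countConnectedComponents numbered_img img_row img_column connectedComp threshold → Spec_countConnectedComponents numbered_img img_row img_column connectedComp threshold (countConnectedComponents numbered_img img_row img_column connectedComp threshold)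
def Claim_changed_countConnectedComponents : Prop := Dom_countConnectedComponents (pvDiffWitness_countConnectedComponents.1) (pvDiffWitness_countConnectedComponents.2.1) (pvDiffWitness_countConnectedComponents.2.2.1) (pvDiffWitness_countConnectedComponents.2.2.2.1) (pvDiffWitness_countConnectedComponents.2.2.2.2) ∧ Pre_countConnectedComponents (pvDiffWitness_countConnectedComponents.1) (pvDiffWitness_countConnectedComponents.2.1) (pvDiffWitness_countConnectedComponents.2.2.1) (pvDiffWitness_countConnectedComponents.2.2.2.1) (pvDiffWitness_countConnectedComponents.2.2.2.2) ∧ D_countConnectedComponents (pvDiffWitness_countConnectedComponents.1) (pvDiffWitness_countConnectedComponents.2.1) (pvDiffWitness_countConnectedComponents.2.2.1) (pvDiffWitness_countConnectedComponents.2.2.2.1) (pvDiffWitness_countConnectedComponents.2.2.2.2) ∧ countConnectedComponents (pvDiffWitness_countConnectedComponents.1) (pvDiffWitness_countConnectedComponents.2.1) (pvDiffWitness_countConnectedComponents.2.2.1) (pvDiffWitness_countConnectedComponents.2.2.2.1) (pvDiffWitness_countConnectedComponents.2.2.2.2) = pvDiffWitnessOut_countConnectedComponents.1 ∧ countConnectedComponents_alt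 (pvDiffWitness_countConnectedComponents.1) (pvDiffWitness_countConnectedComponents.2.1) (pvDiffWitness_countConnectedComponents.2.2.1) (pvDiffWitness_countConnectedComponents.2.2.2.1) (pvDiffWitness_countConnectedComponents.2.2.2.2) = pvDiffWitnessOut_countConnectedComponents.2 ∧ pvDiffWitnessOut_countConnectedComponents.1 ≠ pvDiffWitnessOut_countConnectedComponents.2

-- ===== LEMMAS AND PROOFS =====

-- running min/max of a nonempty list (0 on the empty list), matching Python's min(xs)/max(xs)
def pvMns (l : List Int) : Int := match l with | [] => 0 | x :: t => t.foldl min x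
def pvMxs (l : List Int) : Int := match l with | [] => 0 | x :: t => t.foldl max x

-- A's 5-field stats record as a function of B's coordinate group
def pvSumm (g : List (Int × Int)) : List Int :=
  match g with
  | [] => [0, 0, 0, 0, 0]
  | _ => [(g.length : Int), pvMns (g.map Prod.snd), pvMxs (g.map Prod.snd),
          pvMns (g.map Prod.fst), pvMxs (g.map Prod.fst)]

theorem pvMns_append (x : Int) (t : List Int) (c : Int) :
    pvMns (x :: (t ++ [c])) = min (pvMns (x :: t)) c := by
  simp [pvMns, List.foldl_append]

theorem pvMxs_append (x : Int) (t : List Int) (c : Int) :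
    pvMxs (x :: (t ++ [c])) = max (pvMxs (x :: t)) c := by
  simp [pvMxs, List.foldl_append]

-- index/update computation on a literal 5-element list
theorem pvG0 (a b c d e x : Int) : PySem.List.pyGetD [a, b, c, d, e] 0 x = a := by
  simp [PySem.List.pyGetD, PySem.List.pyIdx?]
theorem pvG1 (a b c d e x : Int) : PySem.List.pyGetD [a, b, c, d, e] 1 x = b := by
  simp [PySem.List.pyGetD, PySem.List.pyIdx?]
theorem pvG2 (a b c d e x : Int) : PySem.List.pyGetD [a, b, c, d, e] 2 x = c := by
  simp [PySem.List.pyGetD, PySem.List.pyIdx?]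
theorem pvG3 (a b c d e x : Int) : PySem.List.pyGetD [a, b, c, d, e] 3 x = d := by
  simp [PySem.List.pyGetD, PySem.List.pyIdx?]
theorem pvG4 (a b c d e x : Int) : PySem.List.pyGetD [a, b, c, d, e] 4 x = e := by
  simp [PySem.List.pyGetD, PySem.List.pyIdx?]
theorem pvS0 (a b c d e v : Int) : PySem.List.pySetD [a, b, c, d, e] 0 v = [v, b, c, d, e] := by
  simp [PySem.List.pySetD, PySem.List.pySet?, PySem.List.pyIdx?]
theorem pvS1 (a b c d e v : Int) : PySem.List.pySetD [a, b, c, d, e] 1 v = [a, v, c, d, e] := by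
  simp [PySem.List.pySetD, PySem.List.pySet?, PySem.List.pyIdx?]
theorem pvS2 (a b c d e v : Int) : PySem.List.pySetD [a, b, c, d, e] 2 v = [a, b, v, d, e] := by
  simp [PySem.List.pySetD, PySem.List.pySet?, PySem.List.pyIdx?]
theorem pvS3 (a b c d e v : Int) : PySem.List.pySetD [a, b, c, d, e] 3 v = [a, b, c, v, e] := by
  simp [PySem.List.pySetD, PySem.List.pySet?, PySem.List.pyIdx?]
theorem pvS4 (a b c d e v : Int) : PySem.List.pySetD [a, b, c, d, e] 4 v = [a, b, c, d, v] := by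
  simp [PySem.List.pySetD, PySem.List.pySet?, PySem.List.pyIdx?]

theorem pvStepA_lit (L m2 M2 m1 M1 row col : Int) (hL : L ≠ 0) :
    pvStepA [L, m2, M2, m1, M1] row col
      = [L + 1, min m2 col, max M2 col, min m1 row, max M1 row] := by
  have hb : (L == 0) = false := by simpa using hL
  simp only [pvStepA, pvG0, pvG1, hb, Bool.false_eq_true, if_false]
  by_cases h1 : m2 > col <;>
    simp only [h1, if_true, if_false, pvS1, pvG2] <;>
  by_cases h2 : M2 < col <;>
    simp only [h2, if_true, if_false, pvS2, pvG3] <;>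
  by_cases h3 : m1 > row <;>
    simp only [h3, if_true, if_false, pvS3, pvG4] <;>
  by_cases h4 : M1 < row <;>
    simp only [h4, if_true, if_false, pvS4, pvG0, pvS0] <;>
  simp <;> omega

theorem pvStepA_zero (row col : Int) :
    pvStepA [0, 0, 0, 0, 0] row col = [1, col, col, row, row] := by
  simp only [pvStepA, pvG0, pvS0, pvS1, pvS2, pvS3, pvS4]
  norm_num [pvS4, pvG0, pvS0]

theorem pvStepA_summ (g : List (Int × Int)) (row col : Int) :
    pvStepA (pvSumm g) row col = pvSumm (g ++ [(row, col)]) := by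
  cases g with
  | nil => simp [pvSumm, pvMns, pvMxs, pvStepA_zero]
  | cons x t =>
    simp only [pvSumm, List.cons_append, List.map_cons, List.map_append, List.map_nil,
      List.length_append, List.length_cons]
    rw [pvMns_append, pvMxs_append, pvMns_append, pvMxs_append]
    rw [pvStepA_lit _ _ _ _ _ _ _ (by push_cast; omega)]
    simp [pvMns, pvMxs]

theorem pvIdx?_lt {n : Nat} {i : Int} {k : Nat} (h : PySem.List.pyIdx? n i = some k) : k < n := by
  unfold PySem.List.pyIdx? at h
  split_ifs at h <;> simp_all <;> omega

-- one cell update commutes with pvSumm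
theorem pvCell_map (cs : List (List (Int × Int))) (i row col : Int) :
    PySem.List.pySetD (cs.map pvSumm) i
        (pvStepA (PySem.List.pyGetD (cs.map pvSumm) i []) row col)
      = (PySem.List.pySetD cs i (PySem.List.pyGetD cs i [] ++ [(row, col)])).map pvSumm := by
  cases h : PySem.List.pyIdx? cs.length i with
  | none =>
    simp [PySem.List.pySetD, PySem.List.pySet?, h]
  | some k =>
    have hk : k < cs.length := pvIdx?_lt h
    have h1 : PySem.List.pyGet? cs i = some cs[k] := by
      simp [PySem.List.pyGet?, h, List.getElem?_eq_getElem hk]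
    have h2 : PySem.List.pyGet? (cs.map pvSumm) i = some (pvSumm cs[k]) := by
      simp [PySem.List.pyGet?, h, List.getElem?_eq_getElem, hk]
    simp [PySem.List.pySetD, PySem.List.pySet?, PySem.List.pyGetD, h, h1, h2,
      List.map_set, pvStepA_summ]

-- a fold whose step commutes with (·.map f) commutes with (·.map f)
theorem pvFoldl_map_rel {α β : Type} (F : List α → Int → List α) (G : List β → Int → List β)
    (f : β → α) (h : ∀ b x, F (b.map f) x = (G b x).map f) :
    ∀ (l : List Int) (b : List β), l.foldl F (b.map f) = (l.foldl G b).map f := by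
  intro l
  induction l with
  | nil => intro b; rfl
  | cons x xs ih => intro b; simp only [List.foldl_cons, h]; exact ih (G b x)

theorem pvFoldl_len {β : Type} (G : List β → Int → List β)
    (h : ∀ b x, (G b x).length = b.length) :
    ∀ (l : List Int) (b : List β), (l.foldl G b).length = b.length := by
  intro l
  induction l with
  | nil => intro b; rfl
  | cons x xs ih => intro b; simp only [List.foldl_cons, ih, h]

-- the full pixel scan: A's stats table is pvSumm of B's coordinate table
theorem pvScan_rel (numbered_img : List (List Int)) (img_row img_column : Int)
    (b : List (List (Int × Int))) :
    (PySem.List.pyRange 0 img_row).foldl (fun pp row =>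
        (PySem.List.pyRange 0 img_column).foldl (fun pp col =>
          let v := PySem.List.pyGetD (PySem.List.pyGetD numbered_img row []) col 0
          if v ≠ 0 then
            PySem.List.pySetD pp (v - 1) (pvStepA (PySem.List.pyGetD pp (v - 1) []) row col)
          else pp) pp) (b.map pvSumm)
      = ((PySem.List.pyRange 0 img_row).foldl (fun cs row =>
          (PySem.List.pyRange 0 img_column).foldl (fun cs col =>
            let v := PySem.List.pyGetD (PySem.List.pyGetD numbered_img row []) col 0
            if v ≠ 0 then
              PySem.List.pySetD cs (v - 1) (PySem.List.pyGetD cs (v - 1) [] ++ [(row, col)])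
            else cs) cs) b).map pvSumm := by
  apply pvFoldl_map_rel
  intro b' row
  apply pvFoldl_map_rel
  intro cs col
  dsimp only
  by_cases hv : PySem.List.pyGetD (PySem.List.pyGetD numbered_img row []) col 0 ≠ 0
  · simp only [if_pos hv]; exact pvCell_map cs _ row col
  · simp only [if_neg hv]

-- the scan preserves the length of the table
theorem pvScan_len (numbered_img : List (List Int)) (img_row img_column : Int)
    (b : List (List (Int × Int))) :
    ((PySem.List.pyRange 0 img_row).foldl (fun cs row =>
        (PySem.List.pyRange 0 img_column).foldl (fun cs col =>
          let v := PySem.List.pyGetD (PySem.List.pyGetD numbered_img row []) col 0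
          if v ≠ 0 then
            PySem.List.pySetD cs (v - 1) (PySem.List.pyGetD cs (v - 1) [] ++ [(row, col)])
          else cs) cs) b).length = b.length := by
  apply pvFoldl_len
  intro b' row
  apply pvFoldl_len
  intro cs col
  dsimp only
  by_cases hv : PySem.List.pyGetD (PySem.List.pyGetD numbered_img row []) col 0 ≠ 0
  · simp only [if_pos hv, PySem.List.length_pySetD]
  · simp only [if_neg hv]

-- reading A's stats record of a group = B's min/max read of the group, for groups that are
-- nonempty whenever threshold ≤ 0
theorem pvRead_summ (threshold : Int) (acc : List (Int × Int)) (g : List (Int × Int))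
    (hg : threshold ≤ 0 → g ≠ []) :
    (if PySem.List.pyGetD (pvSumm g) 0 0 * 4 ≥ threshold then
        acc ++ [(PySem.List.pyGetD (pvSumm g) 1 0 + 1 + PySem.List.pyGetD (pvSumm g) 2 0,
                 PySem.List.pyGetD (pvSumm g) 3 0 + 1 + PySem.List.pyGetD (pvSumm g) 4 0)]
      else acc)
    = (if g ≠ [] ∧ PySem.List.len g * 4 ≥ threshold then
        acc ++ [((PySem.List.min? (g.map Prod.snd) (fun y => y)).getD 0 + 1 + (PySem.List.max? (g.map Prod.snd) (fun y => y)).getD 0,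
                 (PySem.List.min? (g.map Prod.fst) (fun y => y)).getD 0 + 1 + (PySem.List.max? (g.map Prod.fst) (fun y => y)).getD 0)]
      else acc) := by
  cases g with
  | nil =>
    have hth : ¬ threshold ≤ 0 := fun h => (hg h) rfl
    simp [pvSumm, pvG0, PySem.List.len]
    omega
  | cons x t =>
    simp only [pvSumm, List.map_cons, PySem.List.min?_id_cons, PySem.List.max?_id_cons,
      PySem.List.len, pvMns, pvMxs, pvG0, pvG1, pvG2, pvG3, pvG4, Option.getD_some,
      ne_eq, reduceCtorEq, not_false_iff, true_and]

-- the final read-out pass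
theorem pvFinal_rel (connectedComp threshold : Int) (cs : List (List (Int × Int)))
    (hlen : cs.length = (PySem.List.pyRange 0 connectedComp).length)
    (hne : ∀ g ∈ cs, threshold ≤ 0 → g ≠ []) :
    (PySem.List.pyRange 0 connectedComp).foldl (fun playersPosition i =>
        let st := PySem.List.pyGetD (cs.map pvSumm) i []
        if PySem.List.pyGetD st 0 0 * 4 ≥ threshold then
          playersPosition ++ [(PySem.List.pyGetD st 1 0 + 1 + PySem.List.pyGetD st 2 0,
                               PySem.List.pyGetD st 3 0 + 1 + PySem.List.pyGetD st 4 0)]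
        else playersPosition) []
      = cs.foldl (fun centers group =>
          if group ≠ [] ∧ PySem.List.len group * 4 ≥ threshold then
            let rows := group.map Prod.fst
            let cols := group.map Prod.snd
            centers ++ [((PySem.List.min? cols (fun y => y)).getD 0 + 1 + (PySem.List.max? cols (fun y => y)).getD 0,
                         (PySem.List.min? rows (fun y => y)).getD 0 + 1 + (PySem.List.max? rows (fun y => y)).getD 0)]
          else centers) [] := by
  by_cases hcc : 0 ≤ connectedComp
  · have hccn : ((cs.map pvSumm).length : Int) = connectedComp := by
      simp only [List.length_map, hlen, PySem.List.length_pyRange_one]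
      omega
    rw [← hccn]
    have hfold := PySem.List.foldl_pyRange_zero_pyGetD' (cs.map pvSumm) ([] : List Int)
      (fun acc st => if PySem.List.pyGetD st 0 0 * 4 ≥ threshold then
          acc ++ [(PySem.List.pyGetD st 1 0 + 1 + PySem.List.pyGetD st 2 0,
                   PySem.List.pyGetD st 3 0 + 1 + PySem.List.pyGetD st 4 0)]
        else acc) []
    refine hfold.trans ?_
    rw [List.foldl_map]
    exact PySem.List.foldl_congr_mem _ _ _ _
      (fun acc x hx => pvRead_summ threshold acc x (hne x hx))
  · have h1 : PySem.List.pyRange 0 connectedComp = [] := PySem.List.pyRange_one_eq_nil (by omega)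
    have h2 : cs = [] := by
      have := hlen
      rw [h1] at this
      simpa using this
    rw [h1, h2]
    rfl

-- ===== nonemptiness of every group under ¬D_ =====

theorem pvFoldl_pres {α β : Type} (P : α → Prop) (f : α → β → α)
    (h : ∀ a b, P a → P (f a b)) : ∀ (l : List β) (a : α), P a → P (l.foldl f a) := by
  intro l
  induction l with
  | nil => intro a ha; exact ha
  | cons y t ih => intro a ha; exact ih (f a y) (h a y ha)

theorem pvFoldl_hit {α β : Type} (Q P : α → Prop) (f : α → β → α) (x : β)
    (hq : ∀ a b, Q a → Q (f a b))
    (hp : ∀ a b, P a → P (f a b))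
    (hhit : ∀ a, Q a → P (f a x)) :
    ∀ (l : List β), x ∈ l → ∀ a, Q a → P (l.foldl f a) := by
  intro l
  induction l with
  | nil => intro h; simp at h
  | cons y t ih =>
    intro hmem a hQ
    rcases List.mem_cons.mp hmem with h | h
    · subst h
      exact pvFoldl_pres P f hp t (f a x) (hhit a hQ)
    · exact ih h (f a y) (hq a y hQ)

theorem pvIdx?_pos (n : Nat) (i : Int) (h1 : 0 ≤ i) (h2 : i < n) :
    PySem.List.pyIdx? n i = some i.toNat := by
  unfold PySem.List.pyIdx?
  split_ifs <;> first | rfl | omega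

theorem pvIdx?_neg (n : Nat) (i : Int) (h1 : i < 0) (h2 : -(n : Int) ≤ i) :
    PySem.List.pyIdx? n i = some (n - (-i).toNat) := by
  unfold PySem.List.pyIdx?
  split_ifs <;> first | rfl | omega

-- the k-th group stays nonempty through one cell update
theorem pvCell_ne {cs : List (List (Int × Int))} {k : Nat} (i row col : Int)
    (h : (cs.getD k []) ≠ []) :
    ((PySem.List.pySetD cs i (PySem.List.pyGetD cs i [] ++ [(row, col)])).getD k []) ≠ [] := by
  cases hidx : PySem.List.pyIdx? cs.length i with
  | none => simpa [PySem.List.pySetD, PySem.List.pySet?, hidx] using h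
  | some j =>
    have hj : j < cs.length := pvIdx?_lt hidx
    have hk : k < cs.length := by
      by_contra hk
      have hnone : cs[k]? = none := List.getElem?_eq_none (by omega)
      exact h (by simp [List.getD_eq_getElem?_getD, hnone])
    simp only [PySem.List.pySetD, PySem.List.pySet?, hidx, Option.map_some, Option.getD_some]
    by_cases hjk : j = k
    · subst hjk
      simp [List.getD_eq_getElem?_getD, List.getElem?_set_self hj]
    · simpa [List.getD_eq_getElem?_getD, List.getElem?_set_ne hjk] using h

-- a cell update at index k makes the k-th group nonempty
theorem pvCell_hit {cs : List (List (Int × Int))} {k : Nat} (i row col : Int)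
    (hidx : PySem.List.pyIdx? cs.length i = some k) :
    ((PySem.List.pySetD cs i (PySem.List.pyGetD cs i [] ++ [(row, col)])).getD k []) ≠ [] := by
  have hk : k < cs.length := pvIdx?_lt hidx
  simp [PySem.List.pySetD, PySem.List.pySet?, hidx, List.getD_eq_getElem?_getD,
    List.getElem?_set_self hk]

-- if some scanned pixel carries (an alias of) label k+1, group k of the scan is nonempty
theorem pvScan_ne (numbered_img : List (List Int)) (img_row img_column : Int)
    (b : List (List (Int × Int))) (k : Nat) (r c : Int)
    (hr : r ∈ PySem.List.pyRange 0 img_row) (hc : c ∈ PySem.List.pyRange 0 img_column)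
    (hidx : PySem.List.pyIdx? b.length
        (PySem.List.pyGetD (PySem.List.pyGetD numbered_img r []) c 0 - 1) = some k)
    (hv : PySem.List.pyGetD (PySem.List.pyGetD numbered_img r []) c 0 ≠ 0) :
    (((PySem.List.pyRange 0 img_row).foldl (fun cs row =>
        (PySem.List.pyRange 0 img_column).foldl (fun cs col =>
          let v := PySem.List.pyGetD (PySem.List.pyGetD numbered_img row []) col 0
          if v ≠ 0 then
            PySem.List.pySetD cs (v - 1) (PySem.List.pyGetD cs (v - 1) [] ++ [(row, col)])
          else cs) cs) b).getD k []) ≠ [] := by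
  refine pvFoldl_hit (fun cs => cs.length = b.length) (fun cs => cs.getD k [] ≠ [])
    _ r ?_ ?_ ?_ _ hr b rfl
  · -- length invariant through a whole row
    intro cs row hlen
    rw [pvFoldl_len]
    · exact hlen
    · intro cs' col
      dsimp only
      by_cases hv' : PySem.List.pyGetD (PySem.List.pyGetD numbered_img row []) col 0 ≠ 0
      · simp only [if_pos hv', PySem.List.length_pySetD]
      · simp only [if_neg hv']
  · -- nonemptiness preserved through a whole row
    intro cs row hP
    refine pvFoldl_pres (fun cs => cs.getD k [] ≠ []) _ ?_ _ cs hP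
    intro cs' col hP'
    dsimp only
    by_cases hv' : PySem.List.pyGetD (PySem.List.pyGetD numbered_img row []) col 0 ≠ 0
    · simp only [if_pos hv']; exact pvCell_ne _ _ _ hP'
    · simpa [if_neg hv'] using hP'
  · -- the hit row makes group k nonempty
    intro cs hlen
    refine pvFoldl_hit (fun cs' => cs'.length = b.length) (fun cs' => cs'.getD k [] ≠ [])
      _ c ?_ ?_ ?_ _ hc cs hlen
    · intro cs' col hlen'
      dsimp only
      by_cases hv' : PySem.List.pyGetD (PySem.List.pyGetD numbered_img r []) col 0 ≠ 0
      · simp only [if_pos hv', PySem.List.length_pySetD]; exact hlen'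
      · simpa [if_neg hv'] using hlen'
    · intro cs' col hP'
      dsimp only
      by_cases hv' : PySem.List.pyGetD (PySem.List.pyGetD numbered_img r []) col 0 ≠ 0
      · simp only [if_pos hv']; exact pvCell_ne _ _ _ hP'
      · simpa [if_neg hv'] using hP'
    · intro cs' hlen'
      dsimp only
      rw [if_pos hv]
      exact pvCell_hit _ _ _ (by rw [hlen']; exact hidx)

-- a slot value names a valid slot and determines its pixel value up to the alias
theorem pvSlot_spec (cc v s : Int) (h : pvSlot cc v = some s) :
    1 ≤ s ∧ s ≤ cc ∧ v ≠ 0 ∧ (v = s ∨ v = s - cc) := by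
  unfold pvSlot at h
  split_ifs at h with h1 h2 <;> simp at h <;> omega

-- with at least connectedComp distinct addressed slots, every slot in 1..connectedComp is addressed
theorem pvSlots_cover (numbered_img : List (List Int)) (img_row img_column connectedComp s : Int)
    (hs : 1 ≤ s ∧ s ≤ connectedComp)
    (hcard : connectedComp ≤
      ((pvSlots numbered_img img_row img_column connectedComp).dedup.length : Int)) :
    s ∈ pvSlots numbered_img img_row img_column connectedComp := by
  set l := (pvSlots numbered_img img_row img_column connectedComp).dedup with hl
  have hnd : l.Nodup := List.nodup_dedup _
  have hsub : l.toFinset ⊆ Finset.Icc 1 connectedComp := by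
    intro x hx
    have hx' : x ∈ pvSlots numbered_img img_row img_column connectedComp :=
      List.mem_dedup.mp (List.mem_toFinset.mp hx)
    rcases List.mem_filterMap.mp hx' with ⟨v, _, hv⟩
    have := pvSlot_spec connectedComp v x hv
    exact Finset.mem_Icc.mpr ⟨this.1, this.2.1⟩
  have hcardl : l.toFinset.card = l.length := List.toFinset_card_of_nodup hnd
  have hcardIcc : (Finset.Icc (1 : Int) connectedComp).card = connectedComp.toNat := by
    rw [Int.card_Icc]
    omega
  have heq : l.toFinset = Finset.Icc 1 connectedComp :=
    Finset.eq_of_subset_of_card_le hsub (by omega)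
  have : s ∈ l.toFinset := by
    rw [heq]
    exact Finset.mem_Icc.mpr hs
  exact List.mem_dedup.mp (List.mem_toFinset.mp this)

-- an addressed slot comes from an actual scanned pixel, in the scan's own coordinates
theorem pvSlots_to_pixel (numbered_img : List (List Int)) (img_row img_column connectedComp s : Int)
    (h : s ∈ pvSlots numbered_img img_row img_column connectedComp) :
    ∃ r ∈ PySem.List.pyRange 0 img_row, ∃ c ∈ PySem.List.pyRange 0 img_column,
      PySem.List.pyGetD (PySem.List.pyGetD numbered_img r []) c 0 ≠ 0 ∧
      (PySem.List.pyGetD (PySem.List.pyGetD numbered_img r []) c 0 = s ∨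
       PySem.List.pyGetD (PySem.List.pyGetD numbered_img r []) c 0 = s - connectedComp) := by
  rcases List.mem_filterMap.mp h with ⟨v, hvmem, hslot⟩
  rcases List.mem_flatMap.mp hvmem with ⟨rl, hrl, hv⟩
  rcases List.mem_iff_getElem.mp hrl with ⟨i, hi, hri⟩
  rcases List.mem_iff_getElem.mp hv with ⟨j, hj, hcj⟩
  have hi' : i < numbered_img.length ∧ i < img_row.toNat := by
    simp [List.length_take] at hi
    omega
  have hj' : j < rl.length ∧ j < img_column.toNat := by
    simp [List.length_take] at hj
    omega
  have hrow : PySem.List.pyGetD numbered_img (i : Int) [] = rl := by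
    rw [PySem.List.pyGetD_natCast, List.getD_eq_getElem _ _ hi'.1]
    rw [List.getElem_take] at hri
    exact hri
  have hpix : PySem.List.pyGetD rl (j : Int) 0 = v := by
    rw [PySem.List.pyGetD_natCast, List.getD_eq_getElem _ _ hj'.1]
    rw [List.getElem_take] at hcj
    exact hcj
  have hspec := pvSlot_spec connectedComp v s hslot
  refine ⟨(i : Int), ?_, (j : Int), ?_, ?_⟩
  · rw [PySem.List.mem_pyRange_one]; omega
  · rw [PySem.List.mem_pyRange_one]; omega
  · rw [hrow, hpix]
    exact ⟨hspec.2.2.1, hspec.2.2.2⟩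

-- ===== VERDICT helpers =====
theorem pvMain (numbered_img : List (List Int)) (img_row img_column connectedComp threshold : Int)
    (hnd : ¬ D_countConnectedComponents numbered_img img_row img_column connectedComp threshold) :
    countConnectedComponents numbered_img img_row img_column connectedComp threshold
      = countConnectedComponents_alt numbered_img img_row img_column connectedComp threshold := by
  simp only [countConnectedComponents, countConnectedComponents_alt]
  have hinit : ((PySem.List.pyRange 0 connectedComp).map (fun _ => ([] : List (Int × Int)))).map pvSumm
      = (PySem.List.pyRange 0 connectedComp).map (fun _ => ([0, 0, 0, 0, 0] : List Int)) := by
    simp [List.map_map, Function.comp, pvSumm]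
  rw [← hinit, pvScan_rel]
  set b0 : List (List (Int × Int)) :=
    (PySem.List.pyRange 0 connectedComp).map (fun _ => ([] : List (Int × Int))) with hb0
  have hlen : (((PySem.List.pyRange 0 img_row).foldl (fun cs row =>
      (PySem.List.pyRange 0 img_column).foldl (fun cs col =>
        let v := PySem.List.pyGetD (PySem.List.pyGetD numbered_img row []) col 0
        if v ≠ 0 then
          PySem.List.pySetD cs (v - 1) (PySem.List.pyGetD cs (v - 1) [] ++ [(row, col)])
        else cs) cs) b0).length) = (PySem.List.pyRange 0 connectedComp).length :=
    (pvScan_len numbered_img img_row img_column b0).trans (by simp [hb0])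
  refine pvFinal_rel connectedComp threshold _ hlen ?_
  intro g hg hth
  -- locate g at an index k of the scanned table
  rcases List.mem_iff_getElem.mp hg with ⟨k, hk, hgk⟩
  have hkcc : (k : Int) ∈ PySem.List.pyRange 0 connectedComp := by
    rw [PySem.List.mem_pyRange_one]
    have := hk
    rw [hlen, PySem.List.length_pyRange_one] at this
    omega
  -- from ¬D_ every slot in 1..connectedComp is addressed by some scanned pixel
  have hcc0 : (0 : Int) ≤ k ∧ (k : Int) < connectedComp := by
    rw [PySem.List.mem_pyRange_one] at hkcc; omega
  have hcard : connectedComp ≤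
      ((pvSlots numbered_img img_row img_column connectedComp).dedup.length : Int) := by
    by_contra hlt
    exact hnd ⟨hth, by omega, by omega⟩
  have hks : ((k : Int) + 1) ∈ pvSlots numbered_img img_row img_column connectedComp :=
    pvSlots_cover numbered_img img_row img_column connectedComp ((k : Int) + 1)
      ⟨by omega, by omega⟩ hcard
  rcases pvSlots_to_pixel numbered_img img_row img_column connectedComp _ hks with
    ⟨r, hr, c, hc, hv0, hvk⟩
  -- the pixel's label indexes group k
  have hbl : b0.length = connectedComp.toNat := by
    simp [hb0, PySem.List.length_pyRange_one]
  have hidx : PySem.List.pyIdx? b0.length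
      (PySem.List.pyGetD (PySem.List.pyGetD numbered_img r []) c 0 - 1) = some k := by
    rw [hbl]
    rcases hvk with hcase | hcase
    · rw [hcase]
      rw [pvIdx?_pos connectedComp.toNat ((k : Int) + 1 - 1) (by omega) (by omega)]
      congr 1
      omega
    · rw [hcase]
      rw [pvIdx?_neg connectedComp.toNat ((k : Int) + 1 - connectedComp - 1) (by omega) (by omega)]
      congr 1
      omega
  have := pvScan_ne numbered_img img_row img_column b0 k r c hr hc hidx hv0
  rw [List.getD_eq_getElem?_getD, List.getElem?_eq_getElem hk, Option.getD_some, hgk] at this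
  exact this

-- ===== VERDICT (by name: the statements are the Claim_ definitions above) =====
theorem countConnectedComponents_spec : Claim_unchanged_countConnectedComponents := by
  intro numbered_img img_row img_column connectedComp threshold _dom _pre hnd
  exact pvMain numbered_img img_row img_column connectedComp threshold hnd

theorem countConnectedComponents_changed : Claim_changed_countConnectedComponents := by
  unfold Claim_changed_countConnectedComponents; decide
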